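-- pv_equiv track=rewrite | github.com/manwar/perlweeklychallenge-club | challenge-065/lubos-kolouch/python/ch-1.py | numbers_with_sum_of_digits
-- ===== SOURCE A (Python) =====
-- from typing import List
--
-- def numbers_with_sum_of_digits(N: int, S: int) -> List[int]:
--
--     def helper(n: int, s: int, current: int) -> List[int]:
--         if n == 0:
--             return [current] if s == 0 else []
--
--         numbers = []
--         for i in range(10):
--             if n == N and i == 0:  # First digit can't be 0
--                 continue
--             if s - i >= 0:
--                 numbers.extend(helper(n - 1, s - i, current * 10 + i))
--         return numbers
--
--     return helper(N, S, 0)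
-- ===== SOURCE B (Python) =====
-- def numbers_with_sum_of_digits(N, S):
--     # Iterative level-by-level frontier of (value, remaining_sum) pairs,
--     # instead of A's recursive depth-first helper. An empty frontier can
--     # never repopulate, so the expansion loop stops as soon as it empties.
--     if N == 0:
--         return [0] if S == 0 else []
--     frontier = [(d, S - d) for d in range(1, 10) if S - d >= 0]
--     rounds = N - 1
--     while rounds > 0 and frontier:
--         frontier = [(v * 10 + d, r - d)
--                     for (v, r) in frontier
--                     for d in range(10) if r - d >= 0]
--         rounds -= 1
--     return [v for (v, r) in frontier if r == 0]
-- ===== Notes on version B (the rewrite author's own statement) =====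
-- stated objective: alternative
-- what changed: A's recursive depth-first helper (one recursive call per chosen digit, results concatenated) is replaced by an iterative level-by-level frontier of (value, remaining-sum) pairs expanded once per digit position and harvested at the end.
import Mathlib
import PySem

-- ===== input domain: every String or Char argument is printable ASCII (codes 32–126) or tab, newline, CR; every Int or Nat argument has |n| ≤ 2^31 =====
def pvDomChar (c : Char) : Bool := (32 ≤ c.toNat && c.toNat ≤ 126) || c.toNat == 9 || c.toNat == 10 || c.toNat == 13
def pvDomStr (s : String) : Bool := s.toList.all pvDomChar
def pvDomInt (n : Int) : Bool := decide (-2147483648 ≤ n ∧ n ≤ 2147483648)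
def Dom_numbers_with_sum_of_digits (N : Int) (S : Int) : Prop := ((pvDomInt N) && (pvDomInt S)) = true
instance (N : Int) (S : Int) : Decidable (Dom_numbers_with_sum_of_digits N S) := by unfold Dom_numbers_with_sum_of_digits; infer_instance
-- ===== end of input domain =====

-- B replaces A's recursive depth-first helper by an iterative level-by-level frontier
-- of (value, remaining-sum) pairs; same asymptotic cost, different algorithmic shape.

-- ===== PORT A =====
-- fuel = recursion depth budget; the top call passes N.toNat + 1, which is never
-- exhausted on the inputs admitted by Pre_ (recursion depth is exactly N there).
def pvHelperA (N : Int) : Nat → Int → Int → Int → List Int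
  | fuel, n, s, cur =>
    if n = 0 then (if s = 0 then [cur] else [])
    else
      match fuel with
      | 0 => []
      | f + 1 =>
        (PySem.List.pyRange 0 10 1).foldl
          (fun acc i =>
            if n = N ∧ i = 0 then acc
            else if s - i ≥ 0 then acc ++ pvHelperA N f (n - 1) (s - i) (cur * 10 + i)
            else acc) []

def numbers_with_sum_of_digits (N : Int) (S : Int) : List Int :=
  pvHelperA N (N.toNat + 1) N S 0

-- ===== PORT B =====
-- one frontier-expansion step: the inner double comprehension of Source B
def pvStepB (fr : List (Int × Int)) : List (Int × Int) :=
  fr.flatMap (fun p =>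
    (PySem.List.pyRange 0 10 1).filterMap
      (fun d => if p.2 - d ≥ 0 then some (p.1 * 10 + d, p.2 - d) else none))

-- the 'while rounds > 0 and frontier' loop, recursing on the remaining rounds
def pvLoopB : Nat → List (Int × Int) → List (Int × Int)
  | 0, fr => fr
  | r + 1, fr => if fr = [] then fr else pvLoopB r (pvStepB fr)

def numbers_with_sum_of_digits_alt (N : Int) (S : Int) : List Int :=
  if N = 0 then (if S = 0 then [0] else [])
  else
    let init := (PySem.List.pyRange 1 10 1).filterMap
      (fun d => if S - d ≥ 0 then some (d, S - d) else none)
    let fin := pvLoopB (N - 1).toNat init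
    (fin.filter (fun p => p.2 == 0)).map Prod.fst

-- ===== PRECONDITION & SPEC =====
-- Pre_ excludes exactly the inputs with N < 0 and S ≥ 1, on which A's recursion
-- never reaches its base case and raises RecursionError (A returns on N < 0 only when S ≤ 0).
def Pre_numbers_with_sum_of_digits (N : Int) (S : Int) : Prop := 0 ≤ N ∨ S ≤ 0
instance (N : Int) (S : Int) : Decidable (Pre_numbers_with_sum_of_digits N S) := by
  unfold Pre_numbers_with_sum_of_digits; infer_instance

def pvWitness_numbers_with_sum_of_digits : Int × Int := (2, 3)

def Spec_numbers_with_sum_of_digits (N : Int) (S : Int) (out : List Int) : Prop :=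
  out = numbers_with_sum_of_digits_alt N S
instance (N : Int) (S : Int) (out : List Int) : Decidable (Spec_numbers_with_sum_of_digits N S out) := by
  unfold Spec_numbers_with_sum_of_digits; infer_instance

-- ===== CLAIM (what is proved, stated in full; the proofs are below) =====
def Claim_equal_numbers_with_sum_of_digits : Prop :=
  ∀ (N : Int) (S : Int), Dom_numbers_with_sum_of_digits N S →
    Pre_numbers_with_sum_of_digits N S →
    Spec_numbers_with_sum_of_digits N S (numbers_with_sum_of_digits N S)

-- ===== LEMMAS AND PROOFS =====

-- "result of finishing k more expansion rounds from frontier l, then harvesting"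
def pvFk (k : Nat) (l : List (Int × Int)) : List Int :=
  ((pvStepB^[k] l).filter (fun p => p.2 == 0)).map Prod.fst

lemma pvRange10 : PySem.List.pyRange 0 10 1 = [0,1,2,3,4,5,6,7,8,9] := by decide
lemma pvRange19 : PySem.List.pyRange 1 10 1 = [1,2,3,4,5,6,7,8,9] := by decide

lemma pvStepB_append (a b : List (Int × Int)) : pvStepB (a ++ b) = pvStepB a ++ pvStepB b := by
  simp [pvStepB]

lemma pvStepB_nil : pvStepB [] = [] := by simp [pvStepB]

lemma pvIter_append (k : Nat) (a b : List (Int × Int)) :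
    pvStepB^[k] (a ++ b) = pvStepB^[k] a ++ pvStepB^[k] b := by
  induction k generalizing a b with
  | zero => simp
  | succ k ih => simp [Function.iterate_succ_apply, pvStepB_append, ih]

lemma pvIter_nil (k : Nat) : pvStepB^[k] ([] : List (Int × Int)) = [] := by
  induction k with
  | zero => rfl
  | succ k ih => simp [Function.iterate_succ_apply, pvStepB_nil, ih]

lemma pvFk_append (k : Nat) (a b : List (Int × Int)) : pvFk k (a ++ b) = pvFk k a ++ pvFk k b := by
  simp [pvFk, pvIter_append]

lemma pvFk_nil (k : Nat) : pvFk k [] = [] := by simp [pvFk, pvIter_nil]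

lemma pvFk_succ (k : Nat) (l : List (Int × Int)) : pvFk (k + 1) l = pvFk k (pvStepB l) := by
  simp [pvFk, Function.iterate_succ_apply]

lemma pvFk_filterMap (k : Nat) (l : List Int) (Q : Int → Prop) [DecidablePred Q]
    (f : Int → Int × Int) :
    pvFk k (l.filterMap (fun d => if Q d then some (f d) else none))
      = l.flatMap (fun d => if Q d then pvFk k [f d] else []) := by
  induction l with
  | nil => simp [pvFk_nil]
  | cons x xs ih =>
    by_cases h : Q x
    · simp only [List.filterMap_cons, List.flatMap_cons, if_pos h]
      have : f x :: xs.filterMap (fun d => if Q d then some (f d) else none)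
           = [f x] ++ xs.filterMap (fun d => if Q d then some (f d) else none) := rfl
      rw [this, pvFk_append, ih]
    · simp only [List.filterMap_cons, List.flatMap_cons, if_neg h, ih,
        List.nil_append]

-- A's loop body as a flatMap
lemma pvLoopA (P Q : Int → Prop) [DecidablePred P] [DecidablePred Q]
    (h : Int → List Int) (l : List Int) (acc : List Int) :
    l.foldl (fun a i => if P i then a else if Q i then a ++ h i else a) acc
      = acc ++ l.flatMap (fun i => if P i then [] else if Q i then h i else []) := by
  induction l generalizing acc with
  | nil => simp
  | cons x xs ih =>
    simp only [List.foldl_cons, List.flatMap_cons]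
    rw [ih]
    split_ifs <;> simp [List.append_assoc]

-- main invariant: an inner call of A's helper (level n = k < N) equals
-- "expand k more rounds from the singleton frontier, then harvest"
lemma pvHelperA_eq (N : Int) (k fuel : Nat) (s cur : Int)
    (hfuel : k ≤ fuel) (hk : (k : Int) < N) :
    pvHelperA N fuel (k : Int) s cur = pvFk k [(cur, s)] := by
  induction k generalizing fuel s cur with
  | zero =>
    rw [pvHelperA.eq_def]
    by_cases h : s = 0 <;> simp [pvFk, h, List.filter]
  | succ k ih =>
    obtain ⟨f, rfl⟩ : ∃ f, fuel = f + 1 := ⟨fuel - 1, by omega⟩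
    rw [pvHelperA.eq_def]
    have hne : ¬ ((k + 1 : Nat) : Int) = 0 := by push_cast; omega
    simp only [if_neg hne]
    have hPfalse : ∀ i : Int, (((k + 1 : Nat) : Int) = N ∧ i = 0) = False := by
      intro i; apply eq_false; rintro ⟨h1, _⟩; omega
    have hrec : ∀ i : Int, s - i ≥ 0 →
        pvHelperA N f (((k + 1 : Nat) : Int) - 1) (s - i) (cur * 10 + i)
          = pvFk k [(cur * 10 + i, s - i)] := by
      intro i _
      have : (((k + 1 : Nat) : Int) - 1) = ((k : Nat) : Int) := by push_cast; ring
      rw [this]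
      exact ih f (s - i) (cur * 10 + i) (by omega) (by push_cast at hk ⊢; omega)
    calc (PySem.List.pyRange 0 10 1).foldl
          (fun acc i => if ((k + 1 : Nat) : Int) = N ∧ i = 0 then acc
            else if s - i ≥ 0 then acc ++ pvHelperA N f (((k + 1 : Nat) : Int) - 1) (s - i) (cur * 10 + i)
            else acc) []
        = (PySem.List.pyRange 0 10 1).flatMap
            (fun i => if ((k + 1 : Nat) : Int) = N ∧ i = 0 then []
              else if s - i ≥ 0 then pvHelperA N f (((k + 1 : Nat) : Int) - 1) (s - i) (cur * 10 + i)
              else []) := by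
          rw [pvLoopA (fun i => ((k + 1 : Nat) : Int) = N ∧ i = 0) (fun i => s - i ≥ 0)]
          simp
      _ = (PySem.List.pyRange 0 10 1).flatMap
            (fun i => if s - i ≥ 0 then pvFk k [(cur * 10 + i, s - i)] else []) := by
          refine List.flatMap_congr (fun i _ => ?_)
          simp only [hPfalse i, if_false]
          by_cases hsi : s - i ≥ 0
          · rw [if_pos hsi, if_pos hsi, hrec i hsi]
          · rw [if_neg hsi, if_neg hsi]
      _ = pvFk (k + 1) [(cur, s)] := by
          rw [pvFk_succ]
          have hstep : pvStepB [(cur, s)]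
              = (PySem.List.pyRange 0 10 1).filterMap
                  (fun d => if s - d ≥ 0 then some (cur * 10 + d, s - d) else none) := by
            simp [pvStepB]
          rw [hstep, pvFk_filterMap]

lemma pvLoopB_eq (m : Nat) (init : List (Int × Int)) :
    pvLoopB m init = pvStepB^[m] init := by
  induction m generalizing init with
  | zero => rfl
  | succ m ih =>
    rw [pvLoopB]
    by_cases h : init = []
    · rw [if_pos h, h, pvIter_nil]
    · rw [if_neg h, ih, Function.iterate_succ_apply]

-- ===== VERDICT (by name: the statement is the Claim_ definition above) =====
theorem numbers_with_sum_of_digits_spec : Claim_equal_numbers_with_sum_of_digits := by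
  intro N S _ hPre
  unfold Spec_numbers_with_sum_of_digits numbers_with_sum_of_digits numbers_with_sum_of_digits_alt
  dsimp only
  rcases lt_trichotomy N 0 with hN | hN | hN
  · -- N < 0 : Pre_ forces S ≤ 0, both sides are []
    have hS : S ≤ 0 := by rcases hPre with h | h <;> omega
    have hNne : ¬ N = 0 := by omega
    have hfuel : N.toNat + 1 = 0 + 1 := by omega
    have h1 : (N - 1).toNat = 0 := by omega
    rw [pvHelperA.eq_def, hfuel]
    simp only [if_neg hNne, h1, pvLoopB]
    rw [pvLoopA (fun i => True ∧ i = 0) (fun i => S - i ≥ 0)]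
    have hL : (PySem.List.pyRange 0 10 1).flatMap
        (fun i => if True ∧ i = 0 then []
          else if S - i ≥ 0 then pvHelperA N 0 (N - 1) (S - i) (0 * 10 + i) else []) = [] := by
      rw [List.flatMap_eq_nil_iff]
      intro x hx
      rw [PySem.List.mem_pyRange_one] at hx
      by_cases hx0 : x = 0
      · rw [if_pos ⟨trivial, hx0⟩]
      · rw [if_neg (by simp [hx0]), if_neg (by omega)]
    have hR : (PySem.List.pyRange 1 10 1).filterMap
        (fun d => if S - d ≥ 0 then some (d, S - d) else none) = [] := by
      rw [List.filterMap_eq_nil_iff]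
      intro d hd
      rw [PySem.List.mem_pyRange_one] at hd
      rw [if_neg (by omega)]
    rw [hL, hR]
    simp
  · -- N = 0
    subst hN
    by_cases hS : S = 0 <;> simp [pvHelperA.eq_def, hS]
  · -- N ≥ 1 : the invariant with k = (N-1).toNat
    have hNne : ¬ N = 0 := by omega
    rw [pvHelperA.eq_def]
    obtain ⟨f, hf⟩ : ∃ f, N.toNat + 1 = f + 1 := ⟨N.toNat, rfl⟩
    rw [hf]
    simp only [if_neg hNne]
    rw [pvLoopA (fun i => True ∧ i = 0) (fun i => S - i ≥ 0)]
    rw [pvLoopB_eq]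
    have hkcast : (((N - 1).toNat : Nat) : Int) = N - 1 := by omega
    have hcall : ∀ i : Int,
        pvHelperA N f (N - 1) (S - i) (0 * 10 + i) = pvFk (N - 1).toNat [(0 * 10 + i, S - i)] := by
      intro i
      rw [← hkcast]
      exact pvHelperA_eq N (N - 1).toNat f (S - i) (0 * 10 + i) (by omega) (by omega)
    have hfin : ((pvStepB^[(N - 1).toNat]
          ((PySem.List.pyRange 1 10 1).filterMap
            (fun d => if S - d ≥ 0 then some (d, S - d) else none))).filter
          (fun p => p.2 == 0)).map Prod.fst
        = (PySem.List.pyRange 1 10 1).flatMap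
            (fun d => if S - d ≥ 0 then pvFk (N - 1).toNat [(d, S - d)] else []) :=
      pvFk_filterMap (N - 1).toNat _ (fun d => S - d ≥ 0) (fun d => (d, S - d))
    rw [hfin]
    simp only [hcall, pvRange10, pvRange19, List.flatMap_cons, List.flatMap_nil]
    norm_num
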